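-- pv_equiv track=rewrite | github.com/Biggunlotsoffun/FarkleProject | controller_2.py | three_pairs
-- ===== SOURCE A (Python) =====
-- def three_pairs(dice_roll):
--     #dice_roll = self.rand_int_list
--     three_pairs_score = 0
--     three_pairs_dict = {}
--     three_pairs_counter = 0
--     has_pairs = False
--     for i in dice_roll:
--         three_pairs_dict[i] = three_pairs_dict.get(i, 0) + 1
--     for keys, values in three_pairs_dict.items():
--         if values == 2:
--             three_pairs_counter += 1
--     if three_pairs_counter == 3:
--         three_pairs_score = 1500
--         has_pairs = True
--     if has_pairs:
--         return three_pairs_score, True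
--     else:
--         return 0, False
-- ===== SOURCE B (Python) =====
-- def three_pairs(dice_roll):
--     # sort, then scan runs of equal values; count runs of length exactly 2
--     s = sorted(dice_roll)
--     pairs = 0
--     i = 0
--     n = len(s)
--     while i < n:
--         j = i
--         while j < n and s[j] == s[i]:
--             j += 1
--         if j - i == 2:
--             pairs += 1
--         i = j
--     if pairs == 3:
--         return 1500, True
--     return 0, False
-- ===== Notes on version B (the rewrite author's own statement) =====
-- stated objective: alternative
-- what changed: Replaces the frequency-dict build plus items scan with sort-then-run-scan: sort the roll and count maximal runs of equal values whose length is exactly 2.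
import Mathlib
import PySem

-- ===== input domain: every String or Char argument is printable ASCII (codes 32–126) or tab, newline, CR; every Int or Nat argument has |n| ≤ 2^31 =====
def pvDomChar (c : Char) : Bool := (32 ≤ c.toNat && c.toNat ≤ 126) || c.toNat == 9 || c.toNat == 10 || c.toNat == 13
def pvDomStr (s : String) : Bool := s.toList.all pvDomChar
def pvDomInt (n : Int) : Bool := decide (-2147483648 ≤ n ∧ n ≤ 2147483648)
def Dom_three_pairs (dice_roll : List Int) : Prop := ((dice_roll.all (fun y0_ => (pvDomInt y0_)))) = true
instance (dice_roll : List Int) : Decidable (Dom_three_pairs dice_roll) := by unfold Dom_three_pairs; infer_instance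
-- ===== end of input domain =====

-- B replaces A's frequency-dict + items scan with sort-then-run-scan (alternative algorithm, similar cost).


-- ===== PORT A =====
def three_pairs (dice_roll : List Int) : Int × Bool :=
  let three_pairs_score : Int := 0
  let three_pairs_dict :=
    dice_roll.foldl (fun d i => d.insert i (d.getD i 0 + 1)) (PySem.Dict.empty : PySem.Dict Int Int)
  let three_pairs_counter : Int :=
    three_pairs_dict.items.foldl (fun c kv => if kv.2 = 2 then c + 1 else c) 0
  let (three_pairs_score, has_pairs) :=
    if three_pairs_counter = 3 then ((1500 : Int), true) else (three_pairs_score, false)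
  if has_pairs then (three_pairs_score, true) else ((0 : Int), false)

-- ===== PORT B =====
-- scan the sorted list run by run: a run is the maximal leading block of equal values
def pvRunPairs : List Int → Int
  | [] => 0
  | x :: t =>
    (if (1 + ((t.takeWhile (fun y => y == x)).length : Int)) = 2 then 1 else 0)
      + pvRunPairs (t.dropWhile (fun y => y == x))
termination_by l => l.length
decreasing_by
  exact Nat.lt_succ_of_le (t.length_dropWhile_le _)

def three_pairs_alt (dice_roll : List Int) : Int × Bool :=
  let s := PySem.List.sorted dice_roll (fun x => x) false
  let pairs := pvRunPairs s
  if pairs = 3 then ((1500 : Int), true) else ((0 : Int), false)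

-- ===== PRECONDITION & SPEC =====
def Spec_three_pairs (dice_roll : List Int) (out : Int × Bool) : Prop := out = three_pairs_alt dice_roll
instance (dice_roll : List Int) (out : Int × Bool) : Decidable (Spec_three_pairs dice_roll out) := by unfold Spec_three_pairs; infer_instance

-- ===== CLAIM (what is proved, stated in full; the proofs are below) =====
def Claim_equal_three_pairs : Prop := ∀ (dice_roll : List Int), Dom_three_pairs dice_roll → Spec_three_pairs dice_roll (three_pairs dice_roll)

-- ===== LEMMAS AND PROOFS =====

-- after dropping the leading x-run of a ≤-sorted list, x no longer occurs
theorem pvDropWhile_ne (x : Int) (t : List Int) (hp : t.Pairwise (· ≤ ·))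
    (hle : ∀ y ∈ t, x ≤ y) : ∀ y ∈ t.dropWhile (fun y => y == x), y ≠ x := by
  induction t with
  | nil => simp
  | cons a t ih =>
    rw [List.dropWhile_cons]
    split
    · next hax =>
      have hax' : a = x := by simpa using hax
      exact ih hp.tail (fun y hy => hax' ▸ (List.pairwise_cons.mp hp).1 y hy)
    · next hax =>
      have hax' : a ≠ x := by simpa using hax
      have hxa : x < a := lt_of_le_of_ne (hle a (.head t)) (Ne.symm hax')
      intro y hy
      rcases List.mem_cons.mp hy with rfl | hy
      · exact hax'
      · exact ne_of_gt (lt_of_lt_of_le hxa ((List.pairwise_cons.mp hp).1 y hy))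

-- On a ≤-sorted list, the run scan counts exactly the distinct values of multiplicity 2.
theorem pvRunPairs_sorted (l : List Int) (h : l.Pairwise (· ≤ ·)) :
    pvRunPairs l = (((PySem.Set.ofList l).countP (fun v => l.count v = 2)) : Int) := by
  induction l using pvRunPairs.induct with
  | case1 => simp [pvRunPairs, PySem.Set.ofList_nil]
  | case2 x t ih =>
    set tk := t.takeWhile (fun y => y == x) with htk
    set dr := t.dropWhile (fun y => y == x) with hdr
    have htd : tk ++ dr = t := List.takeWhile_append_dropWhile
    have hmemtk : ∀ y ∈ tk, y = x := fun y hy => by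
      simpa using List.mem_takeWhile_imp hy
    have hxle : ∀ y ∈ t, x ≤ y := (List.pairwise_cons.mp h).1
    have hpt : t.Pairwise (· ≤ ·) := h.tail
    have hdr_pw : dr.Pairwise (· ≤ ·) := hpt.sublist (List.dropWhile_sublist _)
    have hdr_ne : ∀ y ∈ dr, y ≠ x := pvDropWhile_ne x t hpt hxle
    have hxdr : x ∉ dr := fun hx => hdr_ne x hx rfl
    -- multiplicity facts
    have hcount_tk : tk.count x = tk.length := by
      rw [List.count_eq_length]; exact fun b hb => (hmemtk b hb).symm
    have hcx : (x :: t).count x = 1 + tk.length := by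
      rw [List.count_cons_self, ← htd, List.count_append, hcount_tk,
        List.count_eq_zero.mpr hxdr]
      omega
    have hcv : ∀ v, v ≠ x → (x :: t).count v = dr.count v := by
      intro v hv
      have htkv : tk.count v = 0 := List.count_eq_zero.mpr
        (fun hvtk => hv (hmemtk v hvtk))
      have h1 : (x :: t).count v = t.count v := by
        simp [List.count_cons]; exact fun h' => hv h'.symm
      rw [h1, ← htd, List.count_append, htkv, Nat.zero_add]
    -- the deduplicated tail is a permutation of the deduplicated dropped suffix
    have hperm : ((PySem.Set.ofList t).discard x).Perm (PySem.Set.ofList dr) := by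
      rw [List.perm_ext_iff_of_nodup
        (PySem.Set.nodup_discard _ _ (PySem.Set.nodup_ofList t)) (PySem.Set.nodup_ofList dr)]
      intro v
      rw [PySem.Set.mem_discard, PySem.Set.mem_ofList, PySem.Set.mem_ofList]
      constructor
      · rintro ⟨hvt, hvx⟩
        rw [← htd, List.mem_append] at hvt
        rcases hvt with hvtk | hvdr
        · exact absurd (hmemtk v hvtk) hvx
        · exact hvdr
      · intro hvdr
        exact ⟨htd ▸ List.mem_append_right _ hvdr, hdr_ne v hvdr⟩
    -- assemble
    rw [pvRunPairs, ← htk, ← hdr, ih hdr_pw, PySem.Set.ofList_cons, List.countP_cons]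
    have hpred : ((PySem.Set.ofList t).discard x).countP (fun v => decide ((x :: t).count v = 2))
        = (PySem.Set.ofList dr).countP (fun v => decide (dr.count v = 2)) := by
      rw [List.countP_congr (fun v hv => ?_), hperm.countP_eq]
      have hvx : v ≠ x := ((PySem.Set.mem_discard _ _ _).mp hv).2
      simp [hcv v hvx]
    rw [hpred]
    have hif : (decide ((x :: t).count x = 2) : Bool) = true ↔ (1 + (tk.length : Int)) = 2 := by
      rw [hcx]; simp; omega
    by_cases hc : (1 + (tk.length : Int)) = 2
    · rw [if_pos hc, if_pos (hif.mpr hc)]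
      push_cast; ring
    · rw [if_neg hc, if_neg (fun hb => hc (hif.mp hb))]
      push_cast; ring

theorem three_pairs_spec : Claim_equal_three_pairs := by
  intro xs _hdom
  unfold Spec_three_pairs three_pairs three_pairs_alt
  simp only [PySem.Dict.foldl_insert_getD_add_one_eq_counter, PySem.Dict.items_counter,
    PySem.List.foldl_ite_add_one, List.countP_map]
  rw [pvRunPairs_sorted _ (by
    simpa using PySem.List.sorted_pairwise xs (fun x => x))]
  set s := PySem.List.sorted xs (fun x => x) false with hs
  have hperm : (PySem.Set.ofList s).Perm (PySem.Set.ofList xs) := by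
    rw [List.perm_ext_iff_of_nodup (PySem.Set.nodup_ofList s) (PySem.Set.nodup_ofList xs)]
    intro v
    rw [PySem.Set.mem_ofList, PySem.Set.mem_ofList, hs, PySem.List.mem_sorted]
  have hcount : ∀ v, s.count v = xs.count v := fun v =>
    (PySem.List.sorted_perm xs (fun x => x) false).count_eq v
  have hcountP : (PySem.Set.ofList s).countP (fun v => decide (s.count v = 2))
      = (PySem.Set.ofList xs).countP (fun v => decide ((xs.count v : Int) = 2)) := by
    rw [hperm.countP_eq, List.countP_congr (fun v _ => ?_)]
    rw [hcount v]
    by_cases hc2 : xs.count v = 2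
    · simp [hc2]
    · have h2 : ¬((xs.count v : Int) = 2) := by omega
      simp [hc2, h2]
  rw [hcountP]
  simp only [Function.comp_def, zero_add]
  by_cases h3 : ((PySem.Set.ofList xs).countP (fun k => decide ((xs.count k : Int) = 2)) : Int) = 3
  · simp [h3]
  · simp [h3]
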